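-- pv_equiv track=rewrite | github.com/surajrdy/6.101 | sat/lab.py | boolify_scheduling_problem
-- ===== SOURCE A (Python) =====
-- def boolify_scheduling_problem(student_preferences, room_capacities):
--     """
--     Produces a CNF formula for the scheduling problem.
--
--     Args:
--         student_preferences: dict mapping students.
--         room_capacities: dict mapping constraints.
--
--     Returns:
--         A CNF formula.
--     """
--     cnf = []
--     students = list(student_preferences.keys())
--     rooms = list(room_capacities.keys())
--
--     # 1 Assigning the students to their room
--     for stud in students:
--         preferred = student_preferences[stud]
--         for room in rooms:
--             # As per the lab
--             var = f"{stud}_{room}"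
--             if room not in preferred:
--                 # Student cannot be in this room
--                 cnf.append([(var, False)])
--
--     # 2: Then we check because each student has to be in atleast one room
--     for stud in students:
--         possible_assignments = []
--         for room in student_preferences[stud]:
--             var = f"{stud}_{room}"
--             possible_assignments.append((var, True))
--         cnf.append(possible_assignments)
--
--     # 3: The student's can't be in two rooms at once
--     for stud in students:
--         preferred = list(student_preferences[stud])
--         for i in range(len(preferred)):
--             for j in range(i + 1, len(preferred)):
--                 var1 = f"{stud}_{preferred[i]}"
--                 var2 = f"{stud}_{preferred[j]}"
--                 # At most one of these variables can be True
--                 cnf.append([(var1, False), (var2, False)])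
--
--     # 4: capacity can't be reached
--     for room in rooms:
--         capacity = room_capacities[room]
--         # vairables of all the preferences
--         students_in_room = [
--             f"{stud}_{room}" for stud in students if room in student_preferences[stud]
--         ]
--         if len(students_in_room) > capacity:
--             # combinations of student's that exceed the list
--             excess_combinations = generate_combinations(students_in_room, capacity + 1)
--             for combo in excess_combinations:
--                 # At least one student in this combination cannot be in the room
--                 cnf.append([(var, False) for var in combo])
--
--     return cnf
--
-- def generate_combinations(elements, k):
--     """
--     Generates all the combinations
--
--     Args:
--         elements: A list of elements
--         k: capacity
--
--     Returns:
--         A list of combinations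
--     """
--     result = []
--
--     # Backtracking algo
--     def backtrack(start, combo):
--         if len(combo) == k:
--             result.append(combo[:])
--             return
--         for i in range(start, len(elements)):
--             combo.append(elements[i])
--             # recurse
--             backtrack(i + 1, combo)
--             # Why is changing it from -1 to nothing more efficient?
--             combo.pop()
--
--     # initiatlize the recursion
--     backtrack(0, [])
--     return result
-- ===== SOURCE B (Python) =====
-- def _ksubsets(elements, k):
--     """All k-element sublists of elements in index-lexicographic order,
--     by structural recursion (take the head or not)."""
--     if k == 0:
--         return [[]]
--     if not elements:
--         return []
--     head, rest = elements[0], elements[1:]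
--     return [[head] + c for c in _ksubsets(rest, k - 1)] + _ksubsets(rest, k)
--
--
-- def boolify_scheduling_problem(student_preferences, room_capacities):
--     """Produces a CNF formula for the scheduling problem (comprehension style;
--     one k-subset enumerator serves both the pair and the capacity clauses)."""
--     items = list(student_preferences.items())
--     rooms = list(room_capacities.keys())
--
--     # 1: a student may only sit in a preferred room
--     cnf = [[(f"{stud}_{room}", False)]
--            for stud, preferred in items
--            for room in rooms if room not in preferred]
--
--     # 2: every student sits in at least one room
--     cnf += [[(f"{stud}_{room}", True) for room in preferred]
--             for stud, preferred in items]
--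
--     # 3: no student sits in two rooms (= for every 2-subset, one is false)
--     cnf += [[(f"{stud}_{room}", False) for room in pair]
--             for stud, preferred in items
--             for pair in _ksubsets(list(preferred), 2)]
--
--     # 4: no room holds more than its capacity students
--     for room, capacity in room_capacities.items():
--         members = [f"{stud}_{room}" for stud, preferred in items
--                    if room in preferred]
--         cnf += [[(var, False) for var in combo]
--                 for combo in _ksubsets(members, capacity + 1)]
--
--     return cnf
-- ===== Notes on version B (the rewrite author's own statement) =====
-- stated objective: simpler
-- what changed: Replaces A's hand-rolled index-based recursive backtracker (generate_combinations) and its nested index pair loop with one structural take-the-head-or-not k-subset enumerator used for both the pair clauses (k=2) and the capacity clauses, drops the now-redundant length>capacity guard, and builds the clause groups as comprehensions over dict items instead of key loops with repeated lookups.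
import Mathlib
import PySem

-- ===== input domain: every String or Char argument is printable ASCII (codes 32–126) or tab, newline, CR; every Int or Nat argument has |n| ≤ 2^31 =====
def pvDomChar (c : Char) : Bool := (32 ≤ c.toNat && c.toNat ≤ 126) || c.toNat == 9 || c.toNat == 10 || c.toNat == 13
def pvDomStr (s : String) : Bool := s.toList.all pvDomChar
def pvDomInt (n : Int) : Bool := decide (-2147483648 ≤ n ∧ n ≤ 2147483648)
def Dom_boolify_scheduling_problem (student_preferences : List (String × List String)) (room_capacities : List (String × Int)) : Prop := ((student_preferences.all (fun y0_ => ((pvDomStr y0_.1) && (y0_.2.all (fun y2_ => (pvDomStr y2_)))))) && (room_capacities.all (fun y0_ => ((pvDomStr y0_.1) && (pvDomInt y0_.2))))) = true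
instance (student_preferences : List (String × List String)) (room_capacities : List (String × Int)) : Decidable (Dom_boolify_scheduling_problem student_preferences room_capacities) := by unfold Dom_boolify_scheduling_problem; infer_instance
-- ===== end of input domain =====

-- B replaces A's index-based recursive backtracker (and A's nested index pair loop) by one
-- structural k-subset enumerator used for both the pair and the capacity clauses, written in
-- comprehension style over the dict items (objective: simpler; same output).

-- ===== PORT A =====
-- generate_combinations' inner `backtrack(start, combo)`; suffix stands for elements[start:]
def pvBacktrack (k : Int) (combo suffix : List String) : List (List String) :=
  if (combo.length : Int) = k then [combo]
  else
    match suffix with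
    | [] => []
    | x :: rest => pvBacktrack k (combo ++ [x]) rest ++ pvBacktrack k combo rest
termination_by suffix.length

def pvGenerateCombinations (elements : List String) (k : Int) : List (List String) :=
  pvBacktrack k [] elements

-- A's group-3 nested index loops `for i in range(len(preferred)): for j in range(i+1, …)`,
-- written over the suffixes preferred[i:]
def pvPairLoop (stud : String) (preferred : List String) (cnf : List (List (String × Bool))) : List (List (String × Bool)) :=
  match preferred with
  | [] => cnf
  | x :: rest =>
      pvPairLoop stud rest
        (rest.foldl (fun cnf y =>
          cnf ++ [[(stud ++ "_" ++ x, false), (stud ++ "_" ++ y, false)]]) cnf)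

def boolify_scheduling_problem (student_preferences : List (String × List String)) (room_capacities : List (String × Int)) : List (List (String × Bool)) :=
  let spd := PySem.Dict.ofList student_preferences
  let rcd := PySem.Dict.ofList room_capacities
  let students := spd.keys
  let rooms := rcd.keys
  let cnf : List (List (String × Bool)) := []
  -- 1 Assigning the students to their room
  let cnf := students.foldl (fun cnf stud =>
    let preferred := spd.getD stud []
    rooms.foldl (fun cnf room =>
      if !(preferred.contains room) then cnf ++ [[(stud ++ "_" ++ room, false)]] else cnf) cnf) cnf
  -- 2: each student has to be in at least one room
  let cnf := students.foldl (fun cnf stud =>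
    let possible := (spd.getD stud []).foldl (fun acc room => acc ++ [(stud ++ "_" ++ room, true)]) []
    cnf ++ [possible]) cnf
  -- 3: the students can't be in two rooms at once
  let cnf := students.foldl (fun cnf stud => pvPairLoop stud (spd.getD stud []) cnf) cnf
  -- 4: capacity can't be exceeded
  let cnf := rooms.foldl (fun cnf room =>
    let capacity := rcd.getD room 0
    let students_in_room := students.foldl (fun acc stud =>
      if (spd.getD stud []).contains room then acc ++ [stud ++ "_" ++ room] else acc) []
    if (students_in_room.length : Int) > capacity then
      (pvGenerateCombinations students_in_room (capacity + 1)).foldl (fun cnf combo =>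
        cnf ++ [combo.foldl (fun acc v => acc ++ [(v, false)]) []]) cnf
    else cnf) cnf
  cnf

-- ===== PORT B =====
-- Source B's _ksubsets: all k-element sublists in index-lexicographic order, structural recursion
def pvKSubsets (elements : List String) (k : Int) : List (List String) :=
  if k = 0 then [[]]
  else
    match elements with
    | [] => []
    | head :: rest => (pvKSubsets rest (k - 1)).map (head :: ·) ++ pvKSubsets rest k
termination_by elements.length

def boolify_scheduling_problem_alt (student_preferences : List (String × List String)) (room_capacities : List (String × Int)) : List (List (String × Bool)) :=
  let items := (PySem.Dict.ofList student_preferences).items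
  let rooms := (PySem.Dict.ofList room_capacities).keys
  let cnf := items.flatMap (fun p =>
    (rooms.filter (fun room => !(p.2.contains room))).map (fun room => [(p.1 ++ "_" ++ room, false)]))
  let cnf := cnf ++ items.map (fun p => p.2.map (fun room => (p.1 ++ "_" ++ room, true)))
  let cnf := cnf ++ items.flatMap (fun p =>
    (pvKSubsets p.2 2).map (fun pair => pair.map (fun room => (p.1 ++ "_" ++ room, false))))
  let cnf := cnf ++ (PySem.Dict.ofList room_capacities).items.flatMap (fun q =>
    let members := (items.filter (fun p => p.2.contains q.1)).map (fun p => p.1 ++ "_" ++ q.1)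
    (pvKSubsets members (q.2 + 1)).map (fun combo => combo.map (fun v => (v, false))))
  cnf

-- ===== PRECONDITION & SPEC =====
def Spec_boolify_scheduling_problem (student_preferences : List (String × List String)) (room_capacities : List (String × Int)) (out : List (List (String × Bool))) : Prop := out = boolify_scheduling_problem_alt student_preferences room_capacities
instance (student_preferences : List (String × List String)) (room_capacities : List (String × Int)) (out : List (List (String × Bool))) : Decidable (Spec_boolify_scheduling_problem student_preferences room_capacities out) := by unfold Spec_boolify_scheduling_problem; infer_instance

-- ===== CLAIM (what is proved, stated in full; the proofs are below) =====
def Claim_equal_boolify_scheduling_problem : Prop := ∀ (student_preferences : List (String × List String)) (room_capacities : List (String × Int)), Dom_boolify_scheduling_problem student_preferences room_capacities → Spec_boolify_scheduling_problem student_preferences room_capacities (boolify_scheduling_problem student_preferences room_capacities)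

-- ===== LEMMAS AND PROOFS =====

-- A's backtracker extends `combo` by k - |combo| further elements of the suffix,
-- in exactly the order of B's structural enumerator.
theorem ksubsets_backtrack (xs : List String) : ∀ (k : Int) (combo : List String),
    pvBacktrack k combo xs = (pvKSubsets xs (k - combo.length)).map (combo ++ ·) := by
  induction xs with
  | nil =>
    intro k combo
    rw [pvBacktrack, pvKSubsets]
    split_ifs with h1 h2 h2 <;> simp_all
    omega
  | cons x rest ih =>
    intro k combo
    rw [pvBacktrack, pvKSubsets]
    by_cases h : (combo.length : Int) = k
    · simp [h]
    · have h2 : ¬ (k - (combo.length : Int) = 0) := by omega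
      simp only [if_neg h, if_neg h2]
      rw [ih k (combo ++ [x]), ih k combo]
      have : k - ((combo ++ [x]).length : Int) = k - combo.length - 1 := by
        simp; omega
      rw [this]
      simp [List.map_map, Function.comp_def]

theorem ksubsets_nil_of_lt (xs : List String) : ∀ (k : Int), (xs.length : Int) < k →
    pvKSubsets xs k = [] := by
  induction xs with
  | nil =>
    intro k h
    simp only [List.length_nil, Int.natCast_zero] at h
    rw [pvKSubsets, if_neg (by omega)]
  | cons x rest ih =>
    intro k h
    simp only [List.length_cons] at h
    rw [pvKSubsets, if_neg (by omega), ih (k-1) (by omega), ih k (by omega)]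
    simp

theorem ksubsets_one (xs : List String) : pvKSubsets xs 1 = xs.map (fun x => [x]) := by
  induction xs with
  | nil => rw [pvKSubsets]; simp
  | cons x rest ih =>
    rw [pvKSubsets, if_neg (by omega)]
    simp [ih, show pvKSubsets rest 0 = [[]] from by rw [pvKSubsets.eq_def]; simp]

theorem pairLoop_eq (stud : String) (xs : List String) : ∀ (cnf : List (List (String × Bool))),
    pvPairLoop stud xs cnf
      = cnf ++ (pvKSubsets xs 2).map (fun pair => pair.map (fun room => (stud ++ "_" ++ room, false))) := by
  induction xs with
  | nil => intro cnf; rw [pvPairLoop, pvKSubsets]; simp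
  | cons x rest ih =>
    intro cnf
    rw [pvPairLoop, ih, PySem.List.foldl_append_singleton_eq_map, pvKSubsets, if_neg (by omega)]
    have : (2 : Int) - 1 = 1 := by omega
    rw [this, ksubsets_one]
    simp [List.map_map, Function.comp_def]

theorem gen_eq_ksubsets (xs : List String) (k : Int) : pvGenerateCombinations xs k = pvKSubsets xs k := by
  rw [pvGenerateCombinations, ksubsets_backtrack]
  simp

-- A's per-room capacity block (guard included) equals B's unguarded enumeration
theorem capacity_block_eq (sir : List String) (cap : Int) (cnf : List (List (String × Bool))) :
    (if (sir.length : Int) > cap then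
      (pvGenerateCombinations sir (cap + 1)).foldl (fun cnf combo =>
        cnf ++ [combo.foldl (fun acc v => acc ++ [(v, false)]) []]) cnf
    else cnf)
    = cnf ++ (pvKSubsets sir (cap + 1)).map (fun combo => combo.map (fun v => (v, false))) := by
  split_ifs with h
  · rw [gen_eq_ksubsets]
    simp only [PySem.List.foldl_append_singleton_eq_map]
    simp
  · rw [ksubsets_nil_of_lt sir (cap+1) (by omega)]
    simp

theorem main_eq (sp : List (String × List String)) (rc : List (String × Int)) :
    boolify_scheduling_problem sp rc = boolify_scheduling_problem_alt sp rc := by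
  unfold boolify_scheduling_problem boolify_scheduling_problem_alt
  have hnodup : (PySem.Dict.ofList sp).keys.Nodup := PySem.Dict.nodup_keys_ofList sp
  have hgetD : ∀ p ∈ (PySem.Dict.ofList sp).items, (PySem.Dict.ofList sp).getD p.1 [] = p.2 := by
    intro p hp
    exact PySem.Dict.getD_of_mem_items _ hp hnodup []
  have hrnodup : (PySem.Dict.ofList rc).keys.Nodup := PySem.Dict.nodup_keys_ofList rc
  have hrgetD : ∀ q ∈ (PySem.Dict.ofList rc).items, (PySem.Dict.ofList rc).getD q.1 0 = q.2 := by
    intro q hq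
    exact PySem.Dict.getD_of_mem_items _ hq hrnodup 0
  simp only [capacity_block_eq]
  simp only [PySem.List.foldl_append_if, PySem.List.foldl_append_singleton_eq_map,
    pairLoop_eq, PySem.List.foldl_append_eq_flatMap]
  simp only [List.nil_append, PySem.Dict.keys, List.flatMap_map, List.map_map,
    List.filter_map]
  simp only [Function.comp_def]
  congr 1
  · congr 1
    · congr 1
      · exact List.flatMap_congr (fun p hp => by rw [hgetD p hp])
      · exact List.map_eq_map_iff.mpr (fun p hp => by rw [hgetD p hp])
    · exact List.flatMap_congr (fun p hp => by rw [hgetD p hp])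
  · exact List.flatMap_congr (fun q hq => by
      rw [hrgetD q hq, List.filter_congr (fun p hp => by rw [hgetD p hp])])

-- ===== VERDICT (by name: the statement is the Claim_ definition above) =====
theorem boolify_scheduling_problem_spec : Claim_equal_boolify_scheduling_problem := by
  intro sp rc _
  unfold Spec_boolify_scheduling_problem
  exact main_eq sp rc
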